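-- pv_equiv track=rewrite | github.com/johannhartmann/storyteller | storyteller_lib/scenes.py | _prepare_plot_thread_guidance
-- ===== SOURCE A (Python) =====
-- from typing import Dict, List, Any
--
-- def _prepare_plot_thread_guidance(active_plot_threads: List[Dict]) -> str:
--     """Prepare plot thread guidance section for scene writing."""
--     if not active_plot_threads:
--         return ""
--
--     plot_thread_sections = []
--
--     # Group threads by importance
--     major_threads = [t for t in active_plot_threads if t["importance"] == "major"]
--     minor_threads = [t for t in active_plot_threads if t["importance"] == "minor"]
--     background_threads = [t for t in active_plot_threads if t["importance"] == "background"]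
--
--     # Format major threads
--     if major_threads:
--         major_section = "MAJOR PLOT THREADS (must be addressed):\n"
--         for thread in major_threads:
--             major_section += f"- {thread['name']}: {thread['description']}\n  Status: {thread['status']}\n  Last development: {thread['last_development']}\n"
--         plot_thread_sections.append(major_section)
--
--     # Format minor threads
--     if minor_threads:
--         minor_section = "MINOR PLOT THREADS (should be addressed if relevant):\n"
--         for thread in minor_threads:
--             minor_section += f"- {thread['name']}: {thread['description']}\n  Status: {thread['status']}\n"
--         plot_thread_sections.append(minor_section)
--
--     # Format background threads
--     if background_threads:
--         background_section = "BACKGROUND THREADS (can be referenced):\n"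
--         for thread in background_threads:
--             background_section += f"- {thread['name']}: {thread['description']}\n"
--         plot_thread_sections.append(background_section)
--
--     # Combine all sections
--     joined_sections = "\n".join(plot_thread_sections)
--     return (
--         f"ACTIVE PLOT THREADS:\n\n"
--         f"{joined_sections}\n\n"
--         f"Ensure that major plot threads are meaningfully advanced in this scene.\n"
--         f"Minor threads should be addressed if they fit naturally with the scene's purpose.\n"
--         f"Background threads can be referenced to maintain continuity."
--     )
-- ===== SOURCE B (Python) =====
-- def _prepare_plot_thread_guidance(active_plot_threads):
--     """Prepare plot thread guidance section for scene writing."""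
--     if not active_plot_threads:
--         return ""
--
--     # Decorate-sort-group: stable-sort threads by importance rank (unknown
--     # importances dropped), then emit headers on rank changes in one linear scan.
--     RANK = {"major": 0, "minor": 1, "background": 2}
--     HEADERS = ["MAJOR PLOT THREADS (must be addressed):\n",
--                "MINOR PLOT THREADS (should be addressed if relevant):\n",
--                "BACKGROUND THREADS (can be referenced):\n"]
--
--     ordered = sorted((t for t in active_plot_threads if t["importance"] in RANK),
--                      key=lambda t: RANK[t["importance"]])
--
--     sections = []
--     prev = None
--     for t in ordered:
--         r = RANK[t["importance"]]
--         if r != prev: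
--             sections.append(HEADERS[r])
--             prev = r
--         entry = f"- {t['name']}: {t['description']}\n"
--         if r < 2:
--             entry += f"  Status: {t['status']}\n"
--         if r == 0:
--             entry += f"  Last development: {t['last_development']}\n"
--         sections[-1] += entry
--
--     return ("ACTIVE PLOT THREADS:\n\n"
--             + "\n".join(sections)
--             + "\n\nEnsure that major plot threads are meaningfully advanced in this scene.\n"
--               "Minor threads should be addressed if they fit naturally with the scene's purpose.\n"
--               "Background threads can be referenced to maintain continuity.")
-- ===== Notes on version B (the rewrite author's own statement) =====
-- stated objective: alternative
-- what changed: Replaces A's three separate importance-filter passes and three copy-pasted section blocks by a decorate-sort-group scheme: a stable sort of the threads by a numeric importance rank followed by one linear scan that opens a new section whenever the rank changes.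
import Mathlib
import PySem

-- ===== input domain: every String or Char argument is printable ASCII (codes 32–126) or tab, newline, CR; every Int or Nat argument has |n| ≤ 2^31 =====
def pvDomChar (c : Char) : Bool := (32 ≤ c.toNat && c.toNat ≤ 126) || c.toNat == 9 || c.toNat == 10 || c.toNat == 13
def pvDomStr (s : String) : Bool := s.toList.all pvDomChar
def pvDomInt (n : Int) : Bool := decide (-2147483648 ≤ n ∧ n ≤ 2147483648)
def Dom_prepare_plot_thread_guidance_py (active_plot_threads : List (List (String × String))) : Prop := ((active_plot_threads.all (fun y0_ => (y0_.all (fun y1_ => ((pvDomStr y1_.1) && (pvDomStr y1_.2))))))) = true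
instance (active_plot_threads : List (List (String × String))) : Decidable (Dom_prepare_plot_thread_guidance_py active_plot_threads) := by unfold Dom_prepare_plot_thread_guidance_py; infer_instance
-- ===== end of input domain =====

-- B replaces A's three filter passes and three copy-pasted section blocks by a decorate-sort-group
-- scheme: stable-sort the threads by importance rank, then one linear scan that starts a new
-- section whenever the rank changes (objective: alternative decomposition, not claimed faster).

-- t[k] on a Python dict; none = KeyError, excluded by Pre_, so the total form defaults to "".
def pvGet (t : List (String × String)) (k : String) : String :=
  ((PySem.Dict.ofList t).get? k).getD ""

-- ===== PORT A =====
def fmtMajorA (t : List (String × String)) : String :=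
  "- " ++ pvGet t "name" ++ ": " ++ pvGet t "description" ++ "\n  Status: " ++ pvGet t "status"
    ++ "\n  Last development: " ++ pvGet t "last_development" ++ "\n"
def fmtMinorA (t : List (String × String)) : String :=
  "- " ++ pvGet t "name" ++ ": " ++ pvGet t "description" ++ "\n  Status: " ++ pvGet t "status" ++ "\n"
def fmtBackgroundA (t : List (String × String)) : String :=
  "- " ++ pvGet t "name" ++ ": " ++ pvGet t "description" ++ "\n"

def prepare_plot_thread_guidance_py (active_plot_threads : List (List (String × String))) : String :=
  if active_plot_threads = [] then ""
  else
    let major_threads := active_plot_threads.filter (fun t => pvGet t "importance" == "major")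
    let minor_threads := active_plot_threads.filter (fun t => pvGet t "importance" == "minor")
    let background_threads := active_plot_threads.filter (fun t => pvGet t "importance" == "background")
    let sections0 : List String := []
    let sections1 := if major_threads ≠ [] then
        sections0 ++ [major_threads.foldl (fun s t => s ++ fmtMajorA t) "MAJOR PLOT THREADS (must be addressed):\n"]
      else sections0
    let sections2 := if minor_threads ≠ [] then
        sections1 ++ [minor_threads.foldl (fun s t => s ++ fmtMinorA t) "MINOR PLOT THREADS (should be addressed if relevant):\n"]
      else sections1
    let sections3 := if background_threads ≠ [] then
        sections2 ++ [background_threads.foldl (fun s t => s ++ fmtBackgroundA t) "BACKGROUND THREADS (can be referenced):\n"]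
      else sections2
    "ACTIVE PLOT THREADS:\n\n" ++ PySem.Str.join "\n" sections3
      ++ "\n\nEnsure that major plot threads are meaningfully advanced in this scene.\nMinor threads should be addressed if they fit naturally with the scene's purpose.\nBackground threads can be referenced to maintain continuity."

-- ===== PORT B =====
-- RANK[t["importance"]] as a partial lookup; none = importance not in RANK (thread dropped)
def rankOf (t : List (String × String)) : Option Nat :=
  if pvGet t "importance" == "major" then some 0
  else if pvGet t "importance" == "minor" then some 1
  else if pvGet t "importance" == "background" then some 2
  else none

def headerB : Nat → String
  | 0 => "MAJOR PLOT THREADS (must be addressed):\n"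
  | 1 => "MINOR PLOT THREADS (should be addressed if relevant):\n"
  | _ => "BACKGROUND THREADS (can be referenced):\n"

-- the loop body's entry string: base line, plus Status for r<2, plus Last development for r=0
def entryB (t : List (String × String)) (r : Nat) : String :=
  let e := "- " ++ pvGet t "name" ++ ": " ++ pvGet t "description" ++ "\n"
  let e := if r < 2 then e ++ "  Status: " ++ pvGet t "status" ++ "\n" else e
  if r = 0 then e ++ "  Last development: " ++ pvGet t "last_development" ++ "\n" else e

-- sections[-1] += s
def appendLast : List String → String → List String
  | [], s => [s]
  | [x], s => [x ++ s]
  | x :: xs, s => x :: appendLast xs s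

-- one iteration of B's grouping loop; state = (sections, prev)
def groupStep (acc : List String × Option Nat) (t : List (String × String)) :
    List String × Option Nat :=
  let r := (rankOf t).getD 0
  let acc' := if acc.2 ≠ some r then (acc.1 ++ [headerB r], some r) else acc
  (appendLast acc'.1 (entryB t r), some r)

def prepare_plot_thread_guidance_py_alt (active_plot_threads : List (List (String × String))) : String :=
  if active_plot_threads = [] then ""
  else
    let ordered := PySem.List.sorted
      (active_plot_threads.filter (fun t => (rankOf t).isSome))
      (fun t => (rankOf t).getD 0) false
    let res := ordered.foldl groupStep ([], none)
    "ACTIVE PLOT THREADS:\n\n" ++ PySem.Str.join "\n" res.1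
      ++ "\n\nEnsure that major plot threads are meaningfully advanced in this scene.\nMinor threads should be addressed if they fit naturally with the scene's purpose.\nBackground threads can be referenced to maintain continuity."

-- ===== PRECONDITION & SPEC =====
def pvHasKey (t : List (String × String)) (k : String) : Prop :=
  ((PySem.Dict.ofList t).get? k).isSome = true

-- Pre_ excludes exactly the inputs where the Python A raises KeyError: a thread without the
-- 'importance' key, or without a key that its importance level's format string reads.
def Pre_prepare_plot_thread_guidance_py (active_plot_threads : List (List (String × String))) : Prop :=
  ∀ t ∈ active_plot_threads, pvHasKey t "importance" ∧
    (pvGet t "importance" = "major" →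
      pvHasKey t "name" ∧ pvHasKey t "description" ∧ pvHasKey t "status" ∧ pvHasKey t "last_development") ∧
    (pvGet t "importance" = "minor" →
      pvHasKey t "name" ∧ pvHasKey t "description" ∧ pvHasKey t "status") ∧
    (pvGet t "importance" = "background" →
      pvHasKey t "name" ∧ pvHasKey t "description")
instance (active_plot_threads : List (List (String × String))) : Decidable (Pre_prepare_plot_thread_guidance_py active_plot_threads) := by
  unfold Pre_prepare_plot_thread_guidance_py pvHasKey; infer_instance

def pvWitness_prepare_plot_thread_guidance_py : (List (List (String × String))) :=
  [[("importance", "major"), ("name", "quest"), ("description", "find it"), ("status", "open"), ("last_development", "started")],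
   [("importance", "background"), ("name", "mood"), ("description", "rain")]]

def Spec_prepare_plot_thread_guidance_py (active_plot_threads : List (List (String × String))) (out : String) : Prop := out = prepare_plot_thread_guidance_py_alt active_plot_threads
instance (active_plot_threads : List (List (String × String))) (out : String) : Decidable (Spec_prepare_plot_thread_guidance_py active_plot_threads out) := by unfold Spec_prepare_plot_thread_guidance_py; infer_instance

-- ===== CLAIM =====
def Claim_equal_prepare_plot_thread_guidance_py : Prop := ∀ (active_plot_threads : List (List (String × String))), Dom_prepare_plot_thread_guidance_py active_plot_threads → Pre_prepare_plot_thread_guidance_py active_plot_threads → Spec_prepare_plot_thread_guidance_py active_plot_threads (prepare_plot_thread_guidance_py active_plot_threads)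

-- ===== LEMMAS AND PROOFS =====
-- insertBy appends at the end when it is 'before' no element
theorem insertBy_all_false {α : Type} (before : α → α → Bool) (x : α) (ys : List α)
    (h : ∀ y ∈ ys, before x y = false) :
    PySem.List.insertBy before x ys = ys ++ [x] := by
  induction ys with
  | nil => simp [PySem.List.insertBy]
  | cons y ys ih =>
    have hy := h y (by simp)
    simp only [PySem.List.insertBy, hy, Bool.false_eq_true, if_false, List.cons_append,
      List.cons.injEq, true_and]
    exact ih (fun y hm => h y (by simp [hm]))

-- insertBy walks past every element it is not 'before'
theorem insertBy_skip {α : Type} (before : α → α → Bool) (x : α) (ys zs : List α)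
    (h : ∀ y ∈ ys, before x y = false) :
    PySem.List.insertBy before x (ys ++ zs) = ys ++ PySem.List.insertBy before x zs := by
  induction ys with
  | nil => simp
  | cons y ys ih =>
    have hy := h y (by simp)
    rw [List.cons_append]
    simp only [PySem.List.insertBy, hy, Bool.false_eq_true, if_false, List.cons_append,
      List.cons.injEq, true_and]
    exact ih (fun y hm => h y (by simp [hm]))

-- the stable sort of a list whose keys all lie in {0,1,2} is the concatenation of its key-buckets
theorem sorted_rank_eq_filters {α : Type} (key : α → Nat) (xs : List α)
    (hb : ∀ x ∈ xs, key x ≤ 2) :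
    PySem.List.sorted xs key false =
      xs.filter (fun t => key t == 0) ++ xs.filter (fun t => key t == 1)
        ++ xs.filter (fun t => key t == 2) := by
  rw [PySem.List.sorted_eq_foldl_insertBy]
  induction xs using List.reverseRecOn with
  | nil => simp
  | append_singleton xs x ih =>
    rw [List.foldl_append, List.foldl_cons, List.foldl_nil,
        ih (fun y hy => hb y (by simp [hy]))]
    have hf0 : ∀ y ∈ xs.filter (fun t => key t == 0), key y = 0 := by
      intro y hy; simpa using (List.mem_filter.mp hy).2
    have hf1 : ∀ y ∈ xs.filter (fun t => key t == 1), key y = 1 := by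
      intro y hy; simpa using (List.mem_filter.mp hy).2
    have hf2 : ∀ y ∈ xs.filter (fun t => key t == 2), key y = 2 := by
      intro y hy; simpa using (List.mem_filter.mp hy).2
    have hx : key x ≤ 2 := hb x (by simp)
    simp only [List.filter_append, List.filter_cons, List.filter_nil]
    interval_cases h : key x
    · -- key x = 0 : skip nothing, insert before the first element of bucket 1 ++ bucket 2
      rw [List.append_assoc, insertBy_skip _ _ _ _ (by intro y hy; simp [hf0 y hy, h])]
      have : PySem.List.insertBy (fun a b => decide (key a < key b)) x
          (xs.filter (fun t => key t == 1) ++ xs.filter (fun t => key t == 2)) =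
          x :: (xs.filter (fun t => key t == 1) ++ xs.filter (fun t => key t == 2)) := by
        cases h12 : xs.filter (fun t => key t == 1) ++ xs.filter (fun t => key t == 2) with
        | nil => simp [PySem.List.insertBy]
        | cons z zs =>
          have hz : z ∈ xs.filter (fun t => key t == 1) ++ xs.filter (fun t => key t == 2) := by
            simp [h12]
          have : key x < key z := by
            rcases List.mem_append.mp hz with hz | hz
            · simp [h, hf1 z hz]
            · simp [h, hf2 z hz]
          simp [PySem.List.insertBy, this]
      rw [this]
      simp [h]
    · -- key x = 1
      rw [List.append_assoc, insertBy_skip _ _ _ _ (by intro y hy; simp [hf0 y hy, h]),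
          insertBy_skip _ _ _ _ (by intro y hy; simp [hf1 y hy, h])]
      have : PySem.List.insertBy (fun a b => decide (key a < key b)) x
          (xs.filter (fun t => key t == 2)) = x :: xs.filter (fun t => key t == 2) := by
        cases h2 : xs.filter (fun t => key t == 2) with
        | nil => simp [PySem.List.insertBy]
        | cons z zs =>
          have hz : z ∈ xs.filter (fun t => key t == 2) := by simp [h2]
          simp [PySem.List.insertBy, h, hf2 z hz]
      rw [this]
      simp [h]
    · -- key x = 2 : skip everything
      rw [List.append_assoc, insertBy_skip _ _ _ _ (by intro y hy; simp [hf0 y hy, h]),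
          insertBy_skip _ _ _ _ (by intro y hy; simp [hf1 y hy, h]),
          insertBy_all_false _ _ _ (by intro y hy; simp [hf2 y hy, h])]
      simp

theorem appendLast_snoc (secs : List String) (h s : String) :
    appendLast (secs ++ [h]) s = secs ++ [h ++ s] := by
  induction secs with
  | nil => simp [appendLast]
  | cons x secs ih =>
    cases hs : secs ++ [h] with
    | nil => simp at hs
    | cons z zs => simp [appendLast, ← hs, ih]

-- B's grouping loop over a run of constant rank r, after the header has been emitted
theorem foldl_groupStep_run (r : Nat) (ts : List (List (String × String)))
    (hr : ∀ t ∈ ts, (rankOf t).getD 0 = r) (secs : List String) (h : String) :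
    ts.foldl groupStep (secs ++ [h], some r) =
      (secs ++ [ts.foldl (fun s t => s ++ entryB t r) h], some r) := by
  induction ts generalizing h with
  | nil => simp
  | cons t ts ih =>
    have ht : (rankOf t).getD 0 = r := hr t (by simp)
    simp only [List.foldl_cons, groupStep, ht, ne_eq, not_true_eq_false, if_false,
      appendLast_snoc]
    exact ih (fun y hy => hr y (by simp [hy])) (h ++ entryB t r)

-- B's grouping loop over one whole bucket: emits its header iff the bucket is non-empty
theorem foldl_groupStep_bucket (r : Nat) (ts : List (List (String × String)))
    (hr : ∀ t ∈ ts, (rankOf t).getD 0 = r) (secs : List String) (prev : Option Nat)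
    (hprev : prev ≠ some r) :
    ts.foldl groupStep (secs, prev) =
      if ts = [] then (secs, prev)
      else (secs ++ [ts.foldl (fun s t => s ++ entryB t r) (headerB r)], some r) := by
  cases ts with
  | nil => simp
  | cons t ts =>
    have ht : (rankOf t).getD 0 = r := hr t (by simp)
    simp only [List.foldl_cons, groupStep, ht, hprev, ne_eq, not_false_eq_true, if_pos,
      appendLast_snoc, List.cons_ne_self, if_neg]
    rw [foldl_groupStep_run r ts (fun y hy => hr y (by simp [hy])) secs (headerB r ++ entryB t r)]
    simp

-- entry formats coincide with A's format strings at each rank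
theorem entryB_zero (t : List (String × String)) : entryB t 0 = fmtMajorA t := by
  simp [entryB, fmtMajorA, String.append_assoc, ← String.toList_inj]
theorem entryB_one (t : List (String × String)) : entryB t 1 = fmtMinorA t := by
  simp [entryB, fmtMinorA, String.append_assoc, ← String.toList_inj]
theorem entryB_two (t : List (String × String)) : entryB t 2 = fmtBackgroundA t := by
  simp [entryB, fmtBackgroundA, String.append_assoc, ← String.toList_inj]

-- the rank-i bucket of the kept threads is A's i-th filtered list
theorem bucket_eq_filter (xs : List (List (String × String))) (i : Nat) (lvl : String)
    (hiff : ∀ t, ((rankOf t).getD 0 == i ∧ (rankOf t).isSome) ↔ pvGet t "importance" == lvl) :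
    (xs.filter (fun t => (rankOf t).isSome)).filter (fun t => (rankOf t).getD 0 == i) =
      xs.filter (fun t => pvGet t "importance" == lvl) := by
  rw [List.filter_filter]
  apply List.filter_congr
  intro t _
  have := hiff t
  by_cases h1 : ((rankOf t).getD 0 == i) = true <;>
    by_cases h2 : (rankOf t).isSome = true <;> simp_all

-- ===== VERDICT =====
theorem prepare_plot_thread_guidance_py_spec : Claim_equal_prepare_plot_thread_guidance_py := by
  intro aps _dom _pre
  unfold Spec_prepare_plot_thread_guidance_py
  unfold prepare_plot_thread_guidance_py prepare_plot_thread_guidance_py_alt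
  by_cases h : aps = []
  · simp [h]
  · simp only [h, if_false]
    have hrank : ∀ t ∈ aps.filter (fun t => (rankOf t).isSome), (rankOf t).getD 0 ≤ 2 := by
      intro t _
      unfold rankOf
      split_ifs <;> simp
    rw [sorted_rank_eq_filters _ _ hrank]
    have h0 : (aps.filter (fun t => (rankOf t).isSome)).filter (fun t => (rankOf t).getD 0 == 0) =
        aps.filter (fun t => pvGet t "importance" == "major") := by
      apply bucket_eq_filter
      intro t; unfold rankOf; split_ifs <;> simp_all
    have h1 : (aps.filter (fun t => (rankOf t).isSome)).filter (fun t => (rankOf t).getD 0 == 1) =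
        aps.filter (fun t => pvGet t "importance" == "minor") := by
      apply bucket_eq_filter
      intro t; unfold rankOf; split_ifs <;> simp_all
    have h2 : (aps.filter (fun t => (rankOf t).isSome)).filter (fun t => (rankOf t).getD 0 == 2) =
        aps.filter (fun t => pvGet t "importance" == "background") := by
      apply bucket_eq_filter
      intro t; unfold rankOf; split_ifs <;> simp_all
    rw [h0, h1, h2]
    set M := aps.filter (fun t => pvGet t "importance" == "major") with hM
    set N := aps.filter (fun t => pvGet t "importance" == "minor") with hN
    set Bg := aps.filter (fun t => pvGet t "importance" == "background") with hBg
    have rM : ∀ t ∈ M, (rankOf t).getD 0 = 0 := by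
      intro t ht
      have := (List.mem_filter.mp ht).2
      simp only [rankOf]; simp_all
    have rN : ∀ t ∈ N, (rankOf t).getD 0 = 1 := by
      intro t ht
      have h' := (List.mem_filter.mp ht).2
      have : pvGet t "importance" = "minor" := by simpa using h'
      simp [rankOf, this]
    have rBg : ∀ t ∈ Bg, (rankOf t).getD 0 = 2 := by
      intro t ht
      have h' := (List.mem_filter.mp ht).2
      have hb : pvGet t "importance" = "background" := by simpa using h'
      simp [rankOf, hb]
    rw [List.foldl_append, List.foldl_append]
    rw [foldl_groupStep_bucket 0 M rM [] none (by simp)]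
    by_cases hm : M = []
    · rw [if_pos hm]
      rw [foldl_groupStep_bucket 1 N rN [] none (by simp)]
      by_cases hn : N = []
      · rw [if_pos hn]
        rw [foldl_groupStep_bucket 2 Bg rBg [] none (by simp)]
        by_cases hbg : Bg = []
        · simp [hm, hn, hbg]
        · rw [if_neg hbg]
          simp [hm, hn, hbg, headerB, entryB_two]
      · rw [if_neg hn]
        rw [foldl_groupStep_bucket 2 Bg rBg _ (some 1) (by simp)]
        by_cases hbg : Bg = []
        · simp [hm, hn, hbg, headerB, entryB_one]
        · simp [hm, hn, hbg, headerB, entryB_one, entryB_two]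
    · rw [if_neg hm]
      rw [foldl_groupStep_bucket 1 N rN _ (some 0) (by simp)]
      by_cases hn : N = []
      · rw [if_pos hn]
        rw [foldl_groupStep_bucket 2 Bg rBg _ (some 0) (by simp)]
        by_cases hbg : Bg = []
        · simp [hm, hn, hbg, headerB, entryB_zero]
        · simp [hm, hn, hbg, headerB, entryB_zero, entryB_two]
      · rw [if_neg hn]
        rw [foldl_groupStep_bucket 2 Bg rBg _ (some 1) (by simp)]
        by_cases hbg : Bg = []
        · simp [hm, hn, hbg, headerB, entryB_zero, entryB_one]
        · simp [hm, hn, hbg, headerB, entryB_zero, entryB_one, entryB_two]
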